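-- pv_equiv track=rewrite | github.com/krishnaAiGen/polkaAI | summarization_api.py | get_group_id
-- ===== SOURCE A (Python) =====
-- def get_group_id(input_text):
--     grouped_id_text = {}
--
--     for dict1 in input_text:
--         id1 = dict1['id']
--         content = dict1['content']
--
--         if id1 not in grouped_id_text:
--             grouped_id_text[id1] = content
--
--         else:
--             grouped_id_text[id1] = grouped_id_text[id1] + '\n' +  content
--
--     return grouped_id_text
-- ===== SOURCE B (Python) =====
-- def get_group_id(input_text):
--     ids = []
--     for d in input_text:
--         if d['id'] not in ids:
--             ids.append(d['id'])
--     return {i: '\n'.join(d['content'] for d in input_text if d['id'] == i)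
--             for i in ids}
-- ===== Notes on version B (the rewrite author's own statement) =====
-- stated objective: alternative
-- what changed: B collects the distinct ids in first-seen order in one pass over a plain list, then for each id joins all its contents with '\n' via a generator over the whole input, replacing A's single pass that grows strings inside a dict; it trades an O(k*n) rescan per id for the absence of any incremental dict/string mutation.
import Mathlib
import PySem

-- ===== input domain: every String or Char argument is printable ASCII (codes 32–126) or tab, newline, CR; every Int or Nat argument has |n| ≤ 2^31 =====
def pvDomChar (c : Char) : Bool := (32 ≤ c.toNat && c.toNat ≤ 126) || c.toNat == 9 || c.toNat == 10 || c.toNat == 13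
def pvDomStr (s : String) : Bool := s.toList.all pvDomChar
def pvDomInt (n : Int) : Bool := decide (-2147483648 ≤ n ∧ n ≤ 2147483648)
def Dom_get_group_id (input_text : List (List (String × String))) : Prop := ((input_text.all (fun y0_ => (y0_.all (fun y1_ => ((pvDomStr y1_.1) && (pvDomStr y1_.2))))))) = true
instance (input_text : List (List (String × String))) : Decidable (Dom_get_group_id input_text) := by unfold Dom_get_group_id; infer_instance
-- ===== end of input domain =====

-- B lists the distinct ids in first-seen order, then joins each id's contents with '\n' by
-- rescanning the input per id, instead of A's single pass mutating a dict of growing strings;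
-- return values agree on all inputs whose rows carry both keys (Pre_ excludes rows missing
-- 'id'/'content', where both Pythons raise KeyError).


-- ===== PORT A =====
-- one loop iteration of A; KeyError on a missing 'id'/'content' key is outside Pre_ (the row is skipped there)
def pvStepA (grouped : PySem.Dict String String) (dict1 : List (String × String)) : PySem.Dict String String :=
  match (PySem.Dict.ofList dict1).get? "id", (PySem.Dict.ofList dict1).get? "content" with
  | some id1, some content =>
      if grouped.contains id1 = false then grouped.insert id1 content
      else grouped.insert id1 (grouped.getD id1 "" ++ "\n" ++ content)   -- getD's "" is never used: the key is present in this branch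
  | _, _ => grouped

def get_group_id (input_text : List (List (String × String))) : List (String × String) :=
  (input_text.foldl pvStepA PySem.Dict.empty).items

-- ===== PORT B =====
-- pass 1 of B: the distinct ids in first-seen order, kept in a plain list
def pvIdStep (ids : List String) (d : List (String × String)) : List String :=
  match (PySem.Dict.ofList d).get? "id" with
  | some i => if i ∈ ids then ids else ids ++ [i]
  | none => ids

-- the generator 'd['content'] for d in input_text if d['id'] == i'
def pvContents (input_text : List (List (String × String))) (i : String) : List String :=
  input_text.filterMap (fun d =>
    match (PySem.Dict.ofList d).get? "id", (PySem.Dict.ofList d).get? "content" with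
    | some j, some c => if j = i then some c else none
    | _, _ => none)

def get_group_id_alt (input_text : List (List (String × String))) : List (String × String) :=
  (input_text.foldl pvIdStep []).map (fun i => (i, PySem.Str.join "\n" (pvContents input_text i)))

-- ===== PRECONDITION & SPEC =====
-- Pre_ excludes exactly the inputs containing a row without an 'id' or a 'content' key, on which Python A raises KeyError.
def Pre_get_group_id (input_text : List (List (String × String))) : Prop :=
  ∀ dict1 ∈ input_text, ((PySem.Dict.ofList dict1).get? "id").isSome = true ∧ ((PySem.Dict.ofList dict1).get? "content").isSome = true
instance (input_text : List (List (String × String))) : Decidable (Pre_get_group_id input_text) := by unfold Pre_get_group_id; infer_instance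
def pvWitness_get_group_id : (List (List (String × String))) :=
  [[("id", "a"), ("content", "x")], [("id", "a"), ("content", "y")], [("id", "b"), ("content", "z")]]
def Spec_get_group_id (input_text : List (List (String × String))) (out : List (String × String)) : Prop := out = get_group_id_alt input_text
instance (input_text : List (List (String × String))) (out : List (String × String)) : Decidable (Spec_get_group_id input_text out) := by unfold Spec_get_group_id; infer_instance

-- ===== CLAIM (what is proved, stated in full; the proofs are below) =====
def Claim_equal_get_group_id : Prop := ∀ (input_text : List (List (String × String))), Dom_get_group_id input_text → Pre_get_group_id input_text → Spec_get_group_id input_text (get_group_id input_text)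

-- ===== LEMMAS AND PROOFS =====

-- '\n'.join(l ++ [c]) extends '\n'.join(l) by '\n' ++ c once l is nonempty (list-of-chars form)
theorem pv_chars_join_append_singleton (sep c : List Char) (l : List (List Char)) (h : l ≠ []) :
    PySem.Chars.join sep (l ++ [c]) = PySem.Chars.join sep l ++ sep ++ c := by
  induction l with
  | nil => simp at h
  | cons a t ih =>
    cases t with
    | nil => simp [PySem.Chars.join_cons_cons, PySem.Chars.join_singleton]
    | cons b r =>
      simp only [List.cons_append, PySem.Chars.join_cons_cons]
      rw [show b :: (r ++ [c]) = (b :: r) ++ [c] from rfl, ih (by simp)]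
      simp [List.append_assoc]

theorem pv_str_join_append_singleton (l : List String) (c : String) (h : l ≠ []) :
    PySem.Str.join "\n" (l ++ [c]) = PySem.Str.join "\n" l ++ "\n" ++ c := by
  rw [← String.toList_inj]
  simp only [PySem.Str.toList_join, String.toList_append, List.map_append, List.map_cons, List.map_nil]
  rw [pv_chars_join_append_singleton _ _ _ (by simpa using h)]

theorem pv_str_join_singleton (c : String) : PySem.Str.join "\n" [c] = c := by
  rw [← String.toList_inj]; simp [PySem.Str.toList_join]

-- pass 1 only ever appends to the accumulator
theorem pv_ids_mono (l : List (List (String × String))) (acc : List String) :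
    ∀ i ∈ acc, i ∈ l.foldl pvIdStep acc := by
  induction l generalizing acc with
  | nil => simp
  | cons d t ih =>
    intro i hi
    refine ih (pvIdStep acc d) i ?_
    unfold pvIdStep
    cases (PySem.Dict.ofList d).get? "id" with
    | none => exact hi
    | some j => dsimp only; split <;> simp [hi]

-- an id occurring in a row of l ends up in the accumulator
theorem pv_mem_ids_of_row (l : List (List (String × String))) (acc : List String)
    (d : List (String × String)) (i : String)
    (hd : d ∈ l) (hid : (PySem.Dict.ofList d).get? "id" = some i) :
    i ∈ l.foldl pvIdStep acc := by
  induction l generalizing acc with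
  | nil => simp at hd
  | cons e t ih =>
    rcases List.mem_cons.mp hd with rfl | h
    · refine pv_ids_mono t (pvIdStep acc d) i ?_
      unfold pvIdStep; rw [hid]; dsimp only; split <;> simp_all
    · exact ih (pvIdStep acc e) h

-- conversely, everything in the accumulator came from acc or from a row's id
theorem pv_ids_src (l : List (List (String × String))) (acc : List String) (i : String)
    (h : i ∈ l.foldl pvIdStep acc) :
    i ∈ acc ∨ ∃ d ∈ l, (PySem.Dict.ofList d).get? "id" = some i := by
  induction l generalizing acc with
  | nil => simp_all
  | cons e t ih =>
    rcases ih (pvIdStep acc e) h with h' | ⟨d, hd, hid⟩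
    · unfold pvIdStep at h'
      cases hje : (PySem.Dict.ofList e).get? "id" with
      | none => rw [hje] at h'; exact Or.inl h'
      | some j =>
        rw [hje] at h'; dsimp only at h'
        split at h'
        · exact Or.inl h'
        · rcases List.mem_append.mp h' with h'' | h''
          · exact Or.inl h''
          · simp at h''; exact Or.inr ⟨e, by simp, h'' ▸ hje⟩
    · exact Or.inr ⟨d, List.mem_cons_of_mem _ hd, hid⟩

-- pass 1 keeps the accumulator duplicate-free
theorem pv_ids_nodup (l : List (List (String × String))) (acc : List String) (h : acc.Nodup) :
    (l.foldl pvIdStep acc).Nodup := by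
  induction l generalizing acc with
  | nil => simpa using h
  | cons e t ih =>
    refine ih (pvIdStep acc e) ?_
    unfold pvIdStep
    cases (PySem.Dict.ofList e).get? "id" with
    | none => exact h
    | some j =>
      dsimp only; split
      · exact h
      · rename_i hnin
        exact List.nodup_append.mpr ⟨h, List.nodup_singleton _, fun a ha b hb => by simp at hb; subst hb; exact fun h' => hnin (h' ▸ ha)⟩

-- no row of l has id i → the generator over l yields nothing for i
theorem pv_contents_nil (l : List (List (String × String))) (i : String)
    (h : ∀ d ∈ l, (PySem.Dict.ofList d).get? "id" ≠ some i) :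
    pvContents l i = [] := by
  unfold pvContents
  rw [List.filterMap_eq_nil_iff]
  intro d hd
  cases hj : (PySem.Dict.ofList d).get? "id" with
  | none => simp
  | some j =>
    cases hc : (PySem.Dict.ofList d).get? "content" with
    | none => simp
    | some c =>
      simp only []
      have := h d hd
      rw [hj] at this
      simp_all

-- some row of l has id i (and, under Pre_, a content) → the generator yields something
theorem pv_contents_ne_nil (l : List (List (String × String))) (i : String)
    (hpre : ∀ d ∈ l, ((PySem.Dict.ofList d).get? "id").isSome = true ∧ ((PySem.Dict.ofList d).get? "content").isSome = true)
    (d : List (String × String)) (hd : d ∈ l) (hid : (PySem.Dict.ofList d).get? "id" = some i) :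
    pvContents l i ≠ [] := by
  intro hnil
  unfold pvContents at hnil
  rw [List.filterMap_eq_nil_iff] at hnil
  obtain ⟨-, hc⟩ := hpre d hd
  cases hcc : (PySem.Dict.ofList d).get? "content" with
  | none => rw [hcc] at hc; simp at hc
  | some c =>
    have := hnil d hd
    rw [hid, hcc] at this
    simp at this

-- generator over a snoc: the last row contributes at most one final element
theorem pv_contents_append (l : List (List (String × String))) (d : List (String × String)) (i : String) :
    pvContents (l ++ [d]) i = pvContents l i ++ pvContents [d] i := by
  unfold pvContents; simp

-- the two loop bodies, with the row's lookups resolved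
theorem pvStepA_eq (g : PySem.Dict String String) (d : List (String × String)) (i c : String)
    (hid : (PySem.Dict.ofList d).get? "id" = some i) (hct : (PySem.Dict.ofList d).get? "content" = some c) :
    pvStepA g d = if g.contains i = false then g.insert i c else g.insert i (g.getD i "" ++ "\n" ++ c) := by
  unfold pvStepA; rw [hid, hct]

theorem pvIdStep_eq (ids : List String) (d : List (String × String)) (i : String)
    (hid : (PySem.Dict.ofList d).get? "id" = some i) :
    pvIdStep ids d = if i ∈ ids then ids else ids ++ [i] := by
  unfold pvIdStep; rw [hid]

-- main invariant: after processing l under Pre_, A's dict is exactly B's table of l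
theorem pv_char (l : List (List (String × String)))
    (hpre : ∀ d ∈ l, ((PySem.Dict.ofList d).get? "id").isSome = true ∧ ((PySem.Dict.ofList d).get? "content").isSome = true) :
    (l.foldl pvStepA PySem.Dict.empty).items
      = (l.foldl pvIdStep []).map (fun i => (i, PySem.Str.join "\n" (pvContents l i))) := by
  induction l using List.reverseRecOn with
  | nil => simp [PySem.Dict.empty]
  | append_singleton l d ih =>
    have hpre' : ∀ e ∈ l, ((PySem.Dict.ofList e).get? "id").isSome = true ∧ ((PySem.Dict.ofList e).get? "content").isSome = true :=
      fun e he => hpre e (List.mem_append_left _ he)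
    have ihl := ih hpre'
    obtain ⟨hidS, hctS⟩ := hpre d (List.mem_append_right _ (by simp))
    obtain ⟨i, hid⟩ := Option.isSome_iff_exists.mp hidS
    obtain ⟨c, hct⟩ := Option.isSome_iff_exists.mp hctS
    set gA := l.foldl pvStepA PySem.Dict.empty with hgA
    set ids := l.foldl pvIdStep [] with hids
    have hkeys : gA.keys = ids := by
      rw [PySem.Dict.keys, ihl, List.map_map]
      exact List.map_id ids
    have hnd : ids.Nodup := pv_ids_nodup l [] List.nodup_nil
    have hstep : ∀ j ∈ ids, pvContents (l ++ [d]) j = pvContents l j ++ pvContents [d] j :=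
      fun j _ => pv_contents_append l d j
    rw [List.foldl_append, List.foldl_append]
    simp only [List.foldl_cons, List.foldl_nil]
    rw [← hgA, ← hids, pvStepA_eq gA d i c hid hct, pvIdStep_eq ids d i hid]
    have hcont : gA.contains i = decide (i ∈ ids) := by
      rw [PySem.Dict.contains_eq_decide_mem_keys, hkeys]
    have hcd : pvContents [d] i = [c] := by
      unfold pvContents; simp [hid, hct]
    by_cases hmem : i ∈ ids
    · -- existing id: A overwrites in place; B's table changes only at i
      rw [hcont, if_neg (by simp [hmem]), if_pos hmem]
      have hcne : pvContents l i ≠ [] := by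
        rcases pv_ids_src l [] i hmem with h | ⟨e, he, hie⟩
        · simp at h
        · exact pv_contents_ne_nil l i hpre' e he hie
      have hgd : gA.getD i "" = PySem.Str.join "\n" (pvContents l i) := by
        refine PySem.Dict.getD_of_mem_items gA ?_ (hkeys ▸ hnd) ""
        rw [ihl]; exact List.mem_map.mpr ⟨i, hmem, rfl⟩
      rw [PySem.Dict.items_insert_of_contains _ _ (by rw [hcont]; simp [hmem]), ihl, List.map_map]
      refine List.map_congr_left (fun j hj => ?_)
      by_cases hji : j = i
      · subst hji
        simp only [Function.comp, beq_self_eq_true, if_pos]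
        rw [hgd, pv_contents_append, hcd, pv_str_join_append_singleton _ _ hcne]
      · have : pvContents [d] j = [] := by unfold pvContents; simp [hid, hct, Ne.symm hji]
        simp [Function.comp, hji, pv_contents_append, this]
    · -- fresh id: A appends a new entry; B's table gains a last row
      rw [hcont, if_pos (by simp [hmem]), if_neg hmem]
      rw [PySem.Dict.items_insert_of_not_contains _ _ (by rw [hcont]; simp [hmem]), ihl, List.map_append]
      congr 1
      · refine List.map_congr_left (fun j hj => ?_)
        have hji : j ≠ i := fun h => hmem (h ▸ hj)
        have : pvContents [d] j = [] := by unfold pvContents; simp [hid, hct, Ne.symm hji]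
        simp [pv_contents_append, this]
      · have hnil : pvContents l i = [] := by
          refine pv_contents_nil l i (fun e he hie => hmem ?_)
          exact pv_mem_ids_of_row l [] e i he hie
        simp [pv_contents_append, hnil, hcd, pv_str_join_singleton]

-- ===== VERDICT (by name: the statement is the Claim_ definition above) =====
theorem get_group_id_spec : Claim_equal_get_group_id := by
  intro input_text _ hpre
  unfold Spec_get_group_id get_group_id get_group_id_alt
  exact pv_char input_text hpre
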